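-- pv_equiv track=rewrite | github.com/thefch/daily_interview_pro_my_solutions | swap_bits.py | swap_bits
-- ===== SOURCE A (Python) =====
-- def convert_to_binary(num):
--     result=''
--     while num != 0:
--         remainder = num % 2  # gives the exact remainder
--         num = num // 2
--         result = str(remainder) + result
--     return result
--
-- def swap_bits(num):
--     results = list(convert_to_binary(num))
--     out =''
--     for i in range(len(results)):
--         if results[i] == '1':
--             out += '0'
--         else:
--             out += '1'
--
--     return '0b'+out
-- ===== SOURCE B (Python) =====
-- def swap_bits(num):
--     L = num.bit_length()
--     if L == 0:
--         return '0b'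
--     return '0b' + format((1 << L) - 1 - num, '0{}b'.format(L))
-- ===== Notes on version B (the rewrite author's own statement) =====
-- stated objective: idiomatic
-- what changed: Replaces A's digit-by-digit conversion loop plus a second per-character flip loop by a closed-form complement (1<<L)-1-num with L=num.bit_length(), formatted once with zero-padding to width L.
-- outside the precondition, e.g. on swap_bits(-1): A does not finish within the time limit, B returns '0b10'
import Mathlib
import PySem

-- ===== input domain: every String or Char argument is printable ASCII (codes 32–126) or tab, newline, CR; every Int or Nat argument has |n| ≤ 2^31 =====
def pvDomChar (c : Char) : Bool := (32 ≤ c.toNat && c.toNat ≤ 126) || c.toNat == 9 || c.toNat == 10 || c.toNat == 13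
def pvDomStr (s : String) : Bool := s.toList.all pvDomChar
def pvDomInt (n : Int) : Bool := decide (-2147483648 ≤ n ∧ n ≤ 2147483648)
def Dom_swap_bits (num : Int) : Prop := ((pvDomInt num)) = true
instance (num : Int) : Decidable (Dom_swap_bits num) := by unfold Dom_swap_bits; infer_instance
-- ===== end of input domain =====

-- B replaces A's convert-then-flip loops by a closed-form complement (2^L - 1 - num) formatted
-- once to width L = num.bit_length()  (objective: simpler/idiomatic).

-- ===== PORT A =====
-- while num != 0: remainder = num % 2; num = num // 2; result = str(remainder) + result
def convertLoop (num : Int) (result : String) : String :=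
  if num = 0 then result
  else if num < 0 then result  -- Python's loop never terminates here; excluded by Pre_
  else convertLoop (PySem.Int.floordiv num 2)
        (PySem.Int.toStr (PySem.Int.mod num 2) ++ result)
termination_by num.toNat
decreasing_by
  rename_i h0 hneg
  rw [PySem.Int.floordiv_eq_ediv_of_pos (by norm_num)]
  omega

def convert_to_binary (num : Int) : String := convertLoop num ""

def swap_bits (num : Int) : String :=
  let results := (convert_to_binary num).toList
  let out := results.foldl (fun out c => out ++ (if c = '1' then "0" else "1")) ""
  "0b" ++ out

-- ===== PORT B =====
-- port of format(x, '0{L}b'): L binary digits of x, MSB first — exact for 0 ≤ x < 2^L (B only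
-- calls it with 0 ≤ x = 2^L - 1 - num < 2^L under Pre_)
def fmtBin : Nat → Int → List Char
  | 0, _ => []
  | L + 1, x =>
      fmtBin L (PySem.Int.floordiv x 2) ++
        [if PySem.Int.mod x 2 = 1 then '1' else '0']

def swap_bits_alt (num : Int) : String :=
  let L := PySem.Int.bitLength num
  if L = 0 then "0b"
  else "0b" ++ String.ofList (fmtBin L ((2 : Int) ^ L - 1 - num))

-- ===== PRECONDITION & SPEC =====
-- Pre_ excludes negative num, on which A's while loop never terminates (num // 2 stays at -1).
def Pre_swap_bits (num : Int) : Prop := 0 ≤ num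
instance (num : Int) : Decidable (Pre_swap_bits num) := by unfold Pre_swap_bits; infer_instance
def pvWitness_swap_bits : Int := (10)

def Spec_swap_bits (num : Int) (out : String) : Prop := out = swap_bits_alt num
instance (num : Int) (out : String) : Decidable (Spec_swap_bits num out) := by unfold Spec_swap_bits; infer_instance

-- ===== CLAIM (what is proved, stated in full; the proofs are below) =====
def Claim_equal_swap_bits : Prop := ∀ (num : Int), Dom_swap_bits num → Pre_swap_bits num → Spec_swap_bits num (swap_bits num)

-- ===== LEMMAS AND PROOFS =====

-- proof-side digit list of A's conversion loop
def bitsA (num : Int) : List Char :=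
  if 0 < num then
    bitsA (PySem.Int.floordiv num 2) ++ [if PySem.Int.mod num 2 = 1 then '1' else '0']
  else []
termination_by num.toNat
decreasing_by
  rename_i h0
  rw [PySem.Int.floordiv_eq_ediv_of_pos (by norm_num)]
  omega

lemma convertLoop_eq (num : Int) (h : 0 ≤ num) (s : String) :
    convertLoop num s = String.ofList (bitsA num ++ s.toList) := by
  by_cases h0 : num = 0
  · subst h0
    rw [convertLoop, bitsA]
    simp
  · have hpos : 0 < num := lt_of_le_of_ne h (Ne.symm h0)
    have hneg : ¬ num < 0 := by omega
    have hdivnn : 0 ≤ PySem.Int.floordiv num 2 := by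
      rw [PySem.Int.floordiv_eq_ediv_of_pos (by norm_num)]; omega
    rw [convertLoop, if_neg h0, if_neg hneg,
        convertLoop_eq (PySem.Int.floordiv num 2) hdivnn]
    conv_rhs => rw [bitsA]
    rw [if_pos hpos]
    congr 1
    have hm01 : PySem.Int.mod num 2 = 0 ∨ PySem.Int.mod num 2 = 1 := by
      have h1 := PySem.Int.mod_nonneg num (b := 2) (by norm_num)
      have h2 := PySem.Int.mod_lt num (b := 2) (by norm_num)
      omega
    rcases hm01 with hm | hm <;> rw [hm] <;> simp <;> rfl
termination_by num.toNat
decreasing_by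
  rw [PySem.Int.floordiv_eq_ediv_of_pos (by norm_num)]
  omega

def flipc (c : Char) : Char := if c = '1' then '0' else '1'

lemma foldl_flip (l : List Char) (acc : String) :
    (l.foldl (fun out c => out ++ (if c = '1' then "0" else "1")) acc).toList
      = acc.toList ++ l.map flipc := by
  induction l generalizing acc with
  | nil => simp
  | cons c l ih =>
      simp only [List.foldl_cons, List.map_cons, ih]
      by_cases h : c = '1' <;> simp [h, flipc]

-- core: flipping A's digit list is B's padded formatting of the complement
lemma bitsA_flip (num : Int) (h : 0 ≤ num) :
    (bitsA num).map flipc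
      = fmtBin (PySem.Int.bitLength num) ((2 : Int) ^ PySem.Int.bitLength num - 1 - num) := by
  induction num using bitsA.induct with
  | case1 n hpos ih =>
      have h' : (0 : Int) ≤ n := by omega
      have hL := PySem.Int.bitLength_of_pos (n := n) hpos
      have hdiv : PySem.Int.floordiv n 2 = n / 2 :=
        PySem.Int.floordiv_eq_ediv_of_pos (by norm_num)
      have hmod : PySem.Int.mod n 2 = n % 2 :=
        PySem.Int.mod_eq_emod_of_pos (by norm_num)
      have hnn2 : (0 : Int) ≤ PySem.Int.floordiv n 2 := by rw [hdiv]; omega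
      rw [bitsA, if_pos hpos, List.map_append, ih hnn2, hL]
      set L := PySem.Int.bitLength (PySem.Int.floordiv n 2) with hLdef
      have hbound : n.natAbs < 2 ^ (L + 1) := by
        rw [hLdef, ← hL]; exact PySem.Int.lt_two_pow_bitLength n
      have hnlt : n < 2 ^ (L + 1) := by
        have h1 : ((n.natAbs : Int)) = n := Int.natAbs_of_nonneg h'
        have h2 : ((n.natAbs : Int)) < ((2 ^ (L + 1) : Nat) : Int) := by exact_mod_cast hbound
        rw [h1] at h2
        push_cast at h2
        exact h2
      rw [fmtBin]
      have hdiv2 : PySem.Int.floordiv ((2 : Int) ^ (L + 1) - 1 - n) 2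
          = (2 : Int) ^ L - 1 - PySem.Int.floordiv n 2 := by
        rw [PySem.Int.floordiv_eq_ediv_of_pos (by norm_num), hdiv]
        have hp : (2 : Int) ^ (L + 1) = 2 * 2 ^ L := by ring
        omega
      have hmod2 : PySem.Int.mod ((2 : Int) ^ (L + 1) - 1 - n) 2 = 1 - PySem.Int.mod n 2 := by
        rw [PySem.Int.mod_eq_emod_of_pos (by norm_num), hmod]
        have hp : (2 : Int) ^ (L + 1) = 2 * 2 ^ L := by ring
        omega
      rw [hdiv2, hmod2]
      congr 1
      have hm01 : PySem.Int.mod n 2 = 0 ∨ PySem.Int.mod n 2 = 1 := by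
        rw [hmod]; omega
      rcases hm01 with hm | hm <;> rw [hm] <;> decide
  | case2 n hpos =>
      have hn0 : n = 0 := by omega
      subst hn0
      simp [bitsA, fmtBin, PySem.Int.bitLength_zero]

-- ===== VERDICT (by name: the statement is the Claim_ definition above) =====
theorem swap_bits_spec : Claim_equal_swap_bits := by
  intro num _ hpre
  unfold Spec_swap_bits swap_bits swap_bits_alt convert_to_binary
  simp only []
  rcases eq_or_lt_of_le hpre with h0 | hpos
  · subst h0
    rw [convertLoop]
    simp [PySem.Int.bitLength_zero]
  · have hLpos : PySem.Int.bitLength num ≠ 0 := by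
      intro hL
      have := PySem.Int.lt_two_pow_bitLength num
      rw [hL] at this
      simp at this
      omega
    rw [if_neg hLpos]
    rw [convertLoop_eq num hpre ""]
    apply String.toList_inj.mp
    simp only [String.toList_append, String.toList_ofList, String.toList_empty,
      List.append_nil]
    rw [foldl_flip]
    simp only [String.toList_empty, List.nil_append]
    rw [bitsA_flip num hpre]
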